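-- pv_equiv track=rewrite | github.com/Arachne0/get_ploting | Human_experts/later/figure6a.py | count_adjacent_stones_over_time
-- ===== SOURCE A (Python) =====
-- def get_neighbors(x, y):
--     """Return the coordinates of 8 possible neighbors."""
--     directions = [(-1, 0), (1, 0), (0, -1), (0, 1),  # Horizontal and vertical
--                   (-1, -1), (-1, 1), (1, -1), (1, 1)]  # Diagonal
--     neighbors = [(x + dx, y + dy) for dx, dy in directions]
--     # Filter neighbors that are within the board (9x4)
--     return [(nx, ny) for nx, ny in neighbors if 0 <= nx < 9 and 0 <= ny < 4]
--
-- def coordinates_to_index(x, y, cols=4):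
--     """Convert 2D coordinates to 1D index."""
--     return x * cols + y
--
-- def index_to_coordinates(index, cols=4):
--     """Convert 1D index to 2D coordinates."""
--     x = index // cols
--     y = index % cols
--     return (x, y)
--
-- def count_adjacent_stones_over_time(actions, is_black=True):
--     """Count adjacent own stones for each step in the action sequence."""
--     adjacent_counts = []
--
--     for current_index in range(len(actions)):
--         # Determine odd or even indices based on stone color
--         if is_black:
--             own_actions = [actions[i] for i in range(current_index + 1) if i % 2 == 1]
--         else:
--             own_actions = [actions[i] for i in range(current_index + 1) if i % 2 == 0]
--
--         # Current action to evaluate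
--         current_action = actions[current_index]
--
--         # Current stone coordinates
--         current_pos = index_to_coordinates(current_action)
--
--         # Get neighbors
--         neighbors = get_neighbors(*current_pos)
--
--         # Count own stones among neighbors
--         count = 0
--         for neighbor in neighbors:
--             neighbor_index = coordinates_to_index(*neighbor)
--             if neighbor_index in own_actions:
--                 count += 1
--
--         # Append the current adjacent count
--         adjacent_counts.append(count)
--
--     return adjacent_counts
-- ===== SOURCE B (Python) =====
-- def count_adjacent_stones_over_time(actions, is_black=True):
--     """Count adjacent own stones for each step in the action sequence.
--
--     One pass: maintain the set of own-colour stones on the 9x4 board played so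
--     far, and test adjacency by coordinate arithmetic on those stones directly,
--     instead of rebuilding the own-action list and a neighbour list every step.
--     """
--     own_parity = 1 if is_black else 0
--     own = set()
--     counts = []
--     for i, a in enumerate(actions):
--         if i % 2 == own_parity and 0 <= a < 36:
--             own.add(a)
--         cx, cy = divmod(a, 4)
--         c = 0
--         for b in own:
--             bx, by = divmod(b, 4)
--             if abs(bx - cx) <= 1 and abs(by - cy) <= 1 and (bx, by) != (cx, cy):
--                 c += 1
--         counts.append(c)
--     return counts
-- ===== Notes on version B (the rewrite author's own statement) =====
-- stated objective: faster
-- what changed: Instead of rebuilding the own-colour action list and an 8-cell neighbour list at every step and scanning the list per neighbour, B keeps one incrementally-grown set of own stones on the board (at most 36 entries) and counts adjacency by coordinate arithmetic over that set in a single pass.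
import Mathlib
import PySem

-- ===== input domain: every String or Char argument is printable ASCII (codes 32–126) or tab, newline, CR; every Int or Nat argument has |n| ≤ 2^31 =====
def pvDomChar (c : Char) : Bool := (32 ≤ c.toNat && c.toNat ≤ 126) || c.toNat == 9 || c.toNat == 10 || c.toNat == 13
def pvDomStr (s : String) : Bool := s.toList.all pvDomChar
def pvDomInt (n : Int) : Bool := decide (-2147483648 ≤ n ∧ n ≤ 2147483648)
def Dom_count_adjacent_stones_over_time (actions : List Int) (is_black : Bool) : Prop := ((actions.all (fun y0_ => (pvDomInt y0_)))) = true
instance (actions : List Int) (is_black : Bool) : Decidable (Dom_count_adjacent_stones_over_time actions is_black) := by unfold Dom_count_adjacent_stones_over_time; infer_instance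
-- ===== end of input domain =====

-- B replaces A's per-step rebuild of the own-action list and of a neighbour list by one
-- incrementally-grown set of own on-board stones, testing adjacency by coordinate
-- arithmetic over that set (objective: faster).

-- ===== PORT A =====
def pvA_get_neighbors (x y : Int) : List (Int × Int) :=
  let directions : List (Int × Int) :=
    [(-1, 0), (1, 0), (0, -1), (0, 1), (-1, -1), (-1, 1), (1, -1), (1, 1)]
  let neighbors := directions.map (fun d => (x + d.1, y + d.2))
  neighbors.filter (fun p => decide (0 ≤ p.1 ∧ p.1 < 9 ∧ 0 ≤ p.2 ∧ p.2 < 4))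

def pvA_coordinates_to_index (x y : Int) : Int := x * 4 + y

def pvA_index_to_coordinates (index : Int) : Int × Int :=
  (PySem.Int.floordiv index 4, PySem.Int.mod index 4)

def count_adjacent_stones_over_time (actions : List Int) (is_black : Bool) : List Int :=
  (PySem.List.pyRange 0 (actions.length : Int)).foldl
    (fun adjacent_counts current_index =>
      let own_actions :=
        if is_black then
          ((PySem.List.pyRange 0 (current_index + 1)).filter
              (fun i => PySem.Int.mod i 2 == 1)).map
            (fun i => PySem.List.pyGetD actions i 0)   -- actions[i]; i is always in range here, so pyGetD is exact
        else
          ((PySem.List.pyRange 0 (current_index + 1)).filter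
              (fun i => PySem.Int.mod i 2 == 0)).map
            (fun i => PySem.List.pyGetD actions i 0)
      let current_action := PySem.List.pyGetD actions current_index 0
      let current_pos := pvA_index_to_coordinates current_action
      let neighbors := pvA_get_neighbors current_pos.1 current_pos.2
      let count :=
        neighbors.foldl
          (fun count neighbor =>
            if own_actions.contains (pvA_coordinates_to_index neighbor.1 neighbor.2) then count + 1
            else count) (0 : Int)
      adjacent_counts ++ [count]) []

-- ===== PORT B =====
-- the Python 'for b in own' loop only accumulates a count, so its result does not
-- depend on set iteration order; it is ported as countP over the set's elements
def pvB_adj_count (own : PySem.Set Int) (a : Int) : Int :=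
  let cx := PySem.Int.floordiv a 4
  let cy := PySem.Int.mod a 4
  ((own.countP (fun b =>
      let bx := PySem.Int.floordiv b 4
      let by_ := PySem.Int.mod b 4
      decide (|bx - cx| ≤ 1 ∧ |by_ - cy| ≤ 1 ∧ ¬(bx = cx ∧ by_ = cy))) : Nat) : Int)

def count_adjacent_stones_over_time_alt (actions : List Int) (is_black : Bool) : List Int :=
  let own_parity : Int := if is_black then 1 else 0
  ((PySem.List.enumerate actions 0).foldl
      (fun st p =>
        let own :=
          if PySem.Int.mod p.1 2 == own_parity && decide (0 ≤ p.2 ∧ p.2 < 36) then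
            PySem.Set.add st.1 p.2
          else st.1
        (own, st.2 ++ [pvB_adj_count own p.2]))
      ((PySem.Set.empty : PySem.Set Int), ([] : List Int))).2

-- ===== PRECONDITION & SPEC =====
def Spec_count_adjacent_stones_over_time (actions : List Int) (is_black : Bool) (out : List Int) : Prop := out = count_adjacent_stones_over_time_alt actions is_black
instance (actions : List Int) (is_black : Bool) (out : List Int) : Decidable (Spec_count_adjacent_stones_over_time actions is_black out) := by unfold Spec_count_adjacent_stones_over_time; infer_instance

-- ===== CLAIM (what is proved, stated in full; the proofs are below) =====
def Claim_equal_count_adjacent_stones_over_time : Prop := ∀ (actions : List Int) (is_black : Bool), Dom_count_adjacent_stones_over_time actions is_black → Spec_count_adjacent_stones_over_time actions is_black (count_adjacent_stones_over_time actions is_black)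

-- ===== LEMMAS AND PROOFS =====

-- A's per-step computation, factored out
def pvStepA (actions : List Int) (par : Int) (ci : Int) : Int :=
  let own := ((PySem.List.pyRange 0 (ci + 1)).filter
      (fun i => PySem.Int.mod i 2 == par)).map (fun i => PySem.List.pyGetD actions i 0)
  let pos := pvA_index_to_coordinates (PySem.List.pyGetD actions ci 0)
  (pvA_get_neighbors pos.1 pos.2).foldl
    (fun c nb => if own.contains (pvA_coordinates_to_index nb.1 nb.2) then c + 1 else c) (0 : Int)

-- B's main loop, as a structural recursion on the remaining actions
def pvRef (par : Int) : List Int → Int → PySem.Set Int → List Int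
  | [], _, _ => []
  | a :: rest, k, S =>
      let S' := if PySem.Int.mod k 2 == par && decide (0 ≤ a ∧ a < 36) then PySem.Set.add S a else S
      pvB_adj_count S' a :: pvRef par rest (k + 1) S'

lemma pvA_eq_map (actions : List Int) (is_black : Bool) :
    count_adjacent_stones_over_time actions is_black
      = (List.range actions.length).map
          (fun j : Nat => pvStepA actions (if is_black then 1 else 0) (j : Int)) := by
  cases is_black <;>
  · simp only [count_adjacent_stones_over_time, Bool.false_eq_true, if_false, if_true,
      PySem.List.foldl_append_singleton_eq_map, PySem.List.pyRange_zero_natCast,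
      List.map_map, List.nil_append]
    rfl

lemma pvB_fold (par : Int) (xs : List Int) :
    ∀ (k : Int) (S : PySem.Set Int) (acc : List Int),
      ((PySem.List.enumerate xs k).foldl
          (fun st p =>
            let own :=
              if PySem.Int.mod p.1 2 == par && decide (0 ≤ p.2 ∧ p.2 < 36) then
                PySem.Set.add st.1 p.2
              else st.1
            (own, st.2 ++ [pvB_adj_count own p.2])) (S, acc)).2
        = acc ++ pvRef par xs k S := by
  induction xs with
  | nil => intro k S acc; simp [pvRef, PySem.List.enumerate_nil]
  | cons a rest ih =>
    intro k S acc
    rw [PySem.List.enumerate_cons, List.foldl_cons]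
    show ((PySem.List.enumerate rest (k + 1)).foldl
        (fun st p =>
          let own :=
            if PySem.Int.mod p.1 2 == par && decide (0 ≤ p.2 ∧ p.2 < 36) then
              PySem.Set.add st.1 p.2
            else st.1
          (own, st.2 ++ [pvB_adj_count own p.2]))
        ((if PySem.Int.mod k 2 == par && decide (0 ≤ a ∧ a < 36) then PySem.Set.add S a else S),
          acc ++ [pvB_adj_count
            (if PySem.Int.mod k 2 == par && decide (0 ≤ a ∧ a < 36) then PySem.Set.add S a else S) a])).2
      = acc ++ pvRef par (a :: rest) k S
    rw [ih]
    simp [pvRef]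

lemma pvB_eq_ref (actions : List Int) (is_black : Bool) :
    count_adjacent_stones_over_time_alt actions is_black
      = pvRef (if is_black then 1 else 0) actions 0 PySem.Set.empty := by
  cases is_black
  · show ((PySem.List.enumerate actions 0).foldl
        (fun st p =>
          let own :=
            if PySem.Int.mod p.1 2 == (0 : Int) && decide (0 ≤ p.2 ∧ p.2 < 36) then
              PySem.Set.add st.1 p.2
            else st.1
          (own, st.2 ++ [pvB_adj_count own p.2]))
        ((PySem.Set.empty : PySem.Set Int), ([] : List Int))).2
      = pvRef 0 actions 0 PySem.Set.empty
    rw [pvB_fold 0 actions 0 PySem.Set.empty []]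
    rfl
  · show ((PySem.List.enumerate actions 0).foldl
        (fun st p =>
          let own :=
            if PySem.Int.mod p.1 2 == (1 : Int) && decide (0 ≤ p.2 ∧ p.2 < 36) then
              PySem.Set.add st.1 p.2
            else st.1
          (own, st.2 ++ [pvB_adj_count own p.2]))
        ((PySem.Set.empty : PySem.Set Int), ([] : List Int))).2
      = pvRef 1 actions 0 PySem.Set.empty
    rw [pvB_fold 1 actions 0 PySem.Set.empty []]
    rfl

lemma pv_mem_nbrs (cx cy : Int) (p : Int × Int) :
    p ∈ pvA_get_neighbors cx cy
      ↔ (0 ≤ p.1 ∧ p.1 < 9 ∧ 0 ≤ p.2 ∧ p.2 < 4 ∧ -1 ≤ p.1 - cx ∧ p.1 - cx ≤ 1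
          ∧ -1 ≤ p.2 - cy ∧ p.2 - cy ≤ 1 ∧ ¬(p.1 = cx ∧ p.2 = cy)) := by
  obtain ⟨nx, ny⟩ := p
  simp only [pvA_get_neighbors, List.mem_filter, List.mem_map, List.mem_cons,
    List.not_mem_nil, or_false, decide_eq_true_eq]
  constructor
  · rintro ⟨⟨⟨dx, dy⟩, hd, he⟩, hb⟩
    simp only [Prod.mk.injEq] at hd he
    omega
  · rintro ⟨h1, h2, h3, h4, h5, h6, h7, h8, h9⟩
    refine ⟨⟨(nx - cx, ny - cy), ?_, ?_⟩, h1, h2, h3, h4⟩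
    · simp only [Prod.mk.injEq]
      omega
    · simp only [Prod.mk.injEq]
      omega

lemma pv_nodup_M (cx cy : Int) :
    ((pvA_get_neighbors cx cy).map (fun p => pvA_coordinates_to_index p.1 p.2)).Nodup := by
  have hN : (pvA_get_neighbors cx cy).Nodup := by
    apply List.Nodup.filter
    apply List.Nodup.map
    · intro d e h
      simp only [Prod.mk.injEq] at h
      obtain ⟨d1, d2⟩ := d
      obtain ⟨e1, e2⟩ := e
      simp only [Prod.mk.injEq] at h ⊢
      omega
    · decide
  refine List.Nodup.map_on ?_ hN
  intro x hx y hy hxy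
  have hxb := (pv_mem_nbrs cx cy x).mp hx
  have hyb := (pv_mem_nbrs cx cy y).mp hy
  obtain ⟨x1, x2⟩ := x
  obtain ⟨y1, y2⟩ := y
  simp only [pvA_coordinates_to_index] at hxy
  simp only [Prod.mk.injEq]
  simp only at hxb hyb
  omega

-- intersection of two duplicate-free lists, counted from either side
lemma pv_inter_count {α : Type} [DecidableEq α] (S M : List α) (hS : S.Nodup) (hM : M.Nodup) :
    M.countP (fun m => decide (m ∈ S)) = S.countP (fun b => decide (b ∈ M)) := by
  have key : ∀ (X Y : List α), X.Nodup →
      X.countP (fun m => decide (m ∈ Y)) = (X.toFinset ∩ Y.toFinset).card := by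
    intro X Y hX
    rw [List.countP_eq_length_filter]
    rw [← List.toFinset_card_of_nodup (hX.filter _)]
    congr 1
    ext a
    simp [Finset.mem_inter, List.mem_toFinset]
  rw [key M S hM, key S M hS, Finset.inter_comm]

-- the heart: A's neighbour scan equals B's arithmetic count over the own set
lemma pv_step_count (a : Int) (L : List Int) (S : PySem.Set Int) (hS : S.Nodup)
    (hmem : ∀ v, v ∈ S ↔ v ∈ L ∧ 0 ≤ v ∧ v < 36) :
    (pvA_get_neighbors (PySem.Int.floordiv a 4) (PySem.Int.mod a 4)).foldl
        (fun c nb => if L.contains (pvA_coordinates_to_index nb.1 nb.2) then c + 1 else c) (0 : Int)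
      = pvB_adj_count S a := by
  rw [PySem.List.foldl_count_if, zero_add]
  show _ = ((List.countP (fun b =>
      decide (|PySem.Int.floordiv b 4 - PySem.Int.floordiv a 4| ≤ 1
        ∧ |PySem.Int.mod b 4 - PySem.Int.mod a 4| ≤ 1
        ∧ ¬(PySem.Int.floordiv b 4 = PySem.Int.floordiv a 4
            ∧ PySem.Int.mod b 4 = PySem.Int.mod a 4))) S : Nat) : Int)
  rw [Nat.cast_inj]
  have hL2S : ∀ nb ∈ pvA_get_neighbors (PySem.Int.floordiv a 4) (PySem.Int.mod a 4),
      ((L.contains (pvA_coordinates_to_index nb.1 nb.2)) = true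
        ↔ decide ((pvA_coordinates_to_index nb.1 nb.2) ∈ S) = true) := by
    intro nb hnb
    have hb := (pv_mem_nbrs _ _ nb).mp hnb
    have hiff : (pvA_coordinates_to_index nb.1 nb.2) ∈ L
        ↔ (pvA_coordinates_to_index nb.1 nb.2) ∈ S := by
      constructor
      · intro h
        refine (hmem _).mpr ⟨h, ?_, ?_⟩ <;> (simp only [pvA_coordinates_to_index]; omega)
      · exact fun h => ((hmem _).mp h).1
    by_cases hx : (pvA_coordinates_to_index nb.1 nb.2) ∈ L
    · simp [hx, hiff.mp hx]
    · have hxs : (pvA_coordinates_to_index nb.1 nb.2) ∉ S := fun h => hx (hiff.mpr h)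
      simp [hx, hxs]
  calc (pvA_get_neighbors (PySem.Int.floordiv a 4) (PySem.Int.mod a 4)).countP
          (fun nb => L.contains (pvA_coordinates_to_index nb.1 nb.2))
      = (pvA_get_neighbors (PySem.Int.floordiv a 4) (PySem.Int.mod a 4)).countP
          (fun nb => decide ((pvA_coordinates_to_index nb.1 nb.2) ∈ S)) :=
        List.countP_congr hL2S
    _ = ((pvA_get_neighbors (PySem.Int.floordiv a 4) (PySem.Int.mod a 4)).map
          (fun p => pvA_coordinates_to_index p.1 p.2)).countP (fun m => decide (m ∈ S)) :=
        by rw [List.countP_map]; rfl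
    _ = S.countP (fun b => decide (b ∈ ((pvA_get_neighbors (PySem.Int.floordiv a 4)
          (PySem.Int.mod a 4)).map (fun p => pvA_coordinates_to_index p.1 p.2)))) :=
        pv_inter_count S _ hS (pv_nodup_M _ _)
    _ = S.countP (fun b =>
          decide (|PySem.Int.floordiv b 4 - PySem.Int.floordiv a 4| ≤ 1
            ∧ |PySem.Int.mod b 4 - PySem.Int.mod a 4| ≤ 1
            ∧ ¬(PySem.Int.floordiv b 4 = PySem.Int.floordiv a 4
                ∧ PySem.Int.mod b 4 = PySem.Int.mod a 4))) := by
        apply List.countP_congr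
        intro b hb
        obtain ⟨hbL, hb0, hb36⟩ := (hmem b).mp hb
        simp only [decide_eq_true_eq]
        have hb4 : PySem.Int.floordiv b 4 = b / 4 :=
          PySem.Int.floordiv_eq_ediv_of_pos (by norm_num)
        have hbm : PySem.Int.mod b 4 = b % 4 :=
          PySem.Int.mod_eq_emod_of_pos (by norm_num)
        constructor
        · intro hM
          rw [List.mem_map] at hM
          obtain ⟨p, hpN, hpidx⟩ := hM
          rw [pv_mem_nbrs] at hpN
          simp only [pvA_coordinates_to_index] at hpidx
          obtain ⟨h1, h2, h3, h4, h5, h6, h7, h8, h9⟩ := hpN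
          have e1 : PySem.Int.floordiv b 4 = p.1 := by rw [hb4]; omega
          have e2 : PySem.Int.mod b 4 = p.2 := by rw [hbm]; omega
          rw [e1, e2, abs_le, abs_le]
          exact ⟨⟨h5, h6⟩, ⟨h7, h8⟩, h9⟩
        · intro hC
          rw [hb4, hbm, abs_le, abs_le] at hC
          apply List.mem_map.mpr
          refine ⟨(b / 4, b % 4), ?_, ?_⟩
          · rw [pv_mem_nbrs]
            simp only
            refine ⟨by omega, by omega, by omega, by omega, hC.1.1, hC.1.2,
              hC.2.1.1, hC.2.1.2, hC.2.2⟩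
          · simp only [pvA_coordinates_to_index]
            omega

lemma pv_ref_eq (par : Int) (actions : List Int) :
    ∀ (suf : List Int) (k : Nat) (S : PySem.Set Int),
      actions.drop k = suf → S.Nodup →
      (∀ v, v ∈ S ↔ ((∃ i : Int, 0 ≤ i ∧ i < (k : Int) ∧ PySem.Int.mod i 2 = par
            ∧ PySem.List.pyGetD actions i 0 = v) ∧ 0 ≤ v ∧ v < 36)) →
      pvRef par suf (k : Int) S
        = (List.range suf.length).map (fun j : Nat => pvStepA actions par ((k + j : Nat) : Int)) := by
  intro suf
  induction suf with
  | nil => intro k S _ _ _; simp [pvRef]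
  | cons a rest ih =>
    intro k S hdrop hnd hmem
    have h9 : actions[k]? = some a := by
      have h : (List.drop k actions)[0]? = actions[k + 0]? := List.getElem?_drop
      rw [hdrop] at h
      simpa using h.symm
    have hgetD : PySem.List.pyGetD actions ((k : Nat) : Int) 0 = a := by
      rw [PySem.List.pyGetD_natCast, List.getD_eq_getElem?_getD, h9]
      rfl
    have hdrop' : actions.drop (k + 1) = rest := by
      rw [← List.tail_drop, hdrop]
      rfl
    have hS'char : ∀ v,
        v ∈ (if PySem.Int.mod (k : Int) 2 == par && decide (0 ≤ a ∧ a < 36)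
              then PySem.Set.add S a else S)
          ↔ ((∃ i : Int, 0 ≤ i ∧ i < (k : Int) + 1 ∧ PySem.Int.mod i 2 = par
                ∧ PySem.List.pyGetD actions i 0 = v) ∧ 0 ≤ v ∧ v < 36) := by
      intro v
      by_cases hc : (PySem.Int.mod (k : Int) 2 == par && decide (0 ≤ a ∧ a < 36)) = true
      · rw [if_pos hc]
        simp only [Bool.and_eq_true, beq_iff_eq, decide_eq_true_eq] at hc
        rw [PySem.Set.mem_add]
        constructor
        · rintro (hv | rfl)
          · obtain ⟨⟨i, h0, h1, h2, h3⟩, hbb⟩ := (hmem v).mp hv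
            exact ⟨⟨i, h0, by omega, h2, h3⟩, hbb⟩
          · exact ⟨⟨(k : Int), by omega, by omega, hc.1, hgetD⟩, hc.2.1, hc.2.2⟩
        · rintro ⟨⟨i, h0, h1, h2, h3⟩, hb1, hb2⟩
          by_cases hik : i < (k : Int)
          · exact Or.inl ((hmem v).mpr ⟨⟨i, h0, hik, h2, h3⟩, hb1, hb2⟩)
          · have hik' : i = (k : Int) := by omega
            rw [hik'] at h3
            rw [hgetD] at h3
            exact Or.inr h3.symm
      · rw [if_neg hc]
        rw [hmem v]
        constructor
        · rintro ⟨⟨i, h0, h1, h2, h3⟩, hbb⟩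
          exact ⟨⟨i, h0, by omega, h2, h3⟩, hbb⟩
        · rintro ⟨⟨i, h0, h1, h2, h3⟩, hb1, hb2⟩
          refine ⟨⟨i, h0, ?_, h2, h3⟩, hb1, hb2⟩
          by_contra hik
          have hik' : i = (k : Int) := by omega
          rw [hik'] at h2 h3
          rw [hgetD] at h3
          exact hc (by
            simp only [Bool.and_eq_true, beq_iff_eq, decide_eq_true_eq]
            exact ⟨h2, by omega⟩)
    have hnd' : (if PySem.Int.mod (k : Int) 2 == par && decide (0 ≤ a ∧ a < 36)
        then PySem.Set.add S a else S).Nodup := by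
      split_ifs
      · exact PySem.Set.nodup_add _ _ hnd
      · exact hnd
    have hLmem : ∀ v : Int,
        v ∈ (((PySem.List.pyRange 0 ((k : Int) + 1)).filter
              (fun i => PySem.Int.mod i 2 == par)).map (fun i => PySem.List.pyGetD actions i 0))
          ↔ (∃ i : Int, 0 ≤ i ∧ i < (k : Int) + 1 ∧ PySem.Int.mod i 2 = par
              ∧ PySem.List.pyGetD actions i 0 = v) := by
      intro v
      constructor
      · intro hv
        rw [List.mem_map] at hv
        obtain ⟨i, hi, rfl⟩ := hv
        rw [List.mem_filter] at hi
        obtain ⟨hr, hp⟩ := hi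
        rw [PySem.List.mem_pyRange_one] at hr
        exact ⟨i, hr.1, hr.2, by simpa using hp, rfl⟩
      · rintro ⟨i, h0, h1, h2, rfl⟩
        rw [List.mem_map]
        exact ⟨i, List.mem_filter.mpr
          ⟨PySem.List.mem_pyRange_one.mpr ⟨h0, h1⟩, by simpa using h2⟩, rfl⟩
    have hgoalL : pvRef par (a :: rest) ((k : Nat) : Int) S
        = pvB_adj_count (if PySem.Int.mod (k : Int) 2 == par && decide (0 ≤ a ∧ a < 36)
              then PySem.Set.add S a else S) a
          :: pvRef par rest ((k : Int) + 1)
              (if PySem.Int.mod (k : Int) 2 == par && decide (0 ≤ a ∧ a < 36)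
                then PySem.Set.add S a else S) := rfl
    rw [hgoalL, List.length_cons, List.range_succ_eq_map, List.map_cons, List.map_map]
    congr 1
    · -- head
      have hmem' : ∀ v, v ∈ (if PySem.Int.mod (k : Int) 2 == par && decide (0 ≤ a ∧ a < 36)
            then PySem.Set.add S a else S)
          ↔ v ∈ (((PySem.List.pyRange 0 ((k : Int) + 1)).filter
              (fun i => PySem.Int.mod i 2 == par)).map (fun i => PySem.List.pyGetD actions i 0))
            ∧ 0 ≤ v ∧ v < 36 :=
        fun v => (hS'char v).trans (and_congr_left' (hLmem v).symm)
      show pvB_adj_count _ a = pvStepA actions par ((k + 0 : Nat) : Int)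
      unfold pvStepA
      rw [show PySem.List.pyGetD actions ((k + 0 : Nat) : Int) 0 = a from hgetD]
      exact (pv_step_count a _ _ hnd' hmem').symm
    · -- tail
      rw [show ((k : Int) + 1) = ((k + 1 : Nat) : Int) by push_cast; ring]
      rw [ih (k + 1) _ hdrop' hnd' hS'char]
      apply List.map_congr_left
      intro j _
      simp only [Function.comp_apply]
      congr 1
      omega

-- ===== VERDICT (by name: the statement is the Claim_ definition above) =====
theorem count_adjacent_stones_over_time_spec : Claim_equal_count_adjacent_stones_over_time := by
  intro actions is_black _hdom
  unfold Spec_count_adjacent_stones_over_time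
  have h := pv_ref_eq (if is_black then 1 else 0) actions actions 0 PySem.Set.empty
    (by simp) (by simp [PySem.Set.empty])
    (by
      intro v
      constructor
      · intro hv
        simp [PySem.Set.empty] at hv
      · rintro ⟨⟨i, h0, h1, -⟩, -⟩
        omega)
  simp only [Nat.cast_zero, Nat.zero_add] at h
  rw [pvA_eq_map, pvB_eq_ref, h]
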